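-- pv_equiv track=rewrite | github.com/joaofelipe1294/trabalho_simpsons | classificadores/projeto/funcoes_de_classificacao.py | combina_predicoes
-- ===== SOURCE A (Python) =====
-- def combina_predicoes(resultados):
-- 	''' combina as saidas dos classificadores em um unico vetor com os resultados '''
-- 	lista_saida = []
-- 	cont_resultados = 0
-- 	iteracoes = len(resultados[0])
-- 	while cont_resultados < iteracoes:
-- 		lista = []
-- 		cont_posicao = 0
-- 		iteracoes_posicao = len(resultados)
-- 		while cont_posicao < iteracoes_posicao:
-- 			lista.append(resultados[cont_posicao][cont_resultados])
-- 			cont_posicao += 1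
-- 		lista_saida.append(lista)
-- 		cont_resultados += 1
--
-- 	predicoes = []
-- 	for result in lista_saida:
-- 		aparicoes = 0
-- 		contador = 0
-- 		index = 0
-- 		while contador < len(result):
-- 			if result[contador] == 1:
-- 				aparicoes += 1
-- 				index = contador
-- 			contador += 1
-- 		if aparicoes == 1:
-- 			predicoes.append(index + 1)
-- 		elif (aparicoes > 1) or (aparicoes == 0):
-- 			predicoes.append(0)
-- 	return predicoes
-- ===== SOURCE B (Python) =====
-- def combina_predicoes(resultados):
-- 	''' combina as saidas dos classificadores em um unico vetor com os resultados '''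
-- 	m = len(resultados[0])
-- 	contagens = [0] * m
-- 	somas = [0] * m
-- 	for i, linha in enumerate(resultados):
-- 		for j in range(m):
-- 			if linha[j] == 1:
-- 				contagens[j] += 1
-- 				somas[j] += i + 1
-- 	return [s if c == 1 else 0 for c, s in zip(contagens, somas)]
-- ===== Notes on version B (the rewrite author's own statement) =====
-- stated objective: alternative
-- what changed: Replaces transpose-then-count-per-column by a single row-major streaming pass that maintains per-column accumulators (vote count and sum of row-index+1) and reads each prediction off as the sum when the count is exactly one.
import Mathlib
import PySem

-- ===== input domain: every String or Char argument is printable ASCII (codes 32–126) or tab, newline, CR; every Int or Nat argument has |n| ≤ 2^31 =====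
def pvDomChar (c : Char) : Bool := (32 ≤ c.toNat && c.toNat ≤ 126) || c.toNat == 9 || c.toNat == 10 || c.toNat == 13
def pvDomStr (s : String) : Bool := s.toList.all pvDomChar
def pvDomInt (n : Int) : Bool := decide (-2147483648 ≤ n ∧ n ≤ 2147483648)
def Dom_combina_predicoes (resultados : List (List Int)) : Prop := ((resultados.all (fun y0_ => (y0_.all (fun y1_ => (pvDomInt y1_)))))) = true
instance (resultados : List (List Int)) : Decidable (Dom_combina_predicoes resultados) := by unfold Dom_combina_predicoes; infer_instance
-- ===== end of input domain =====

-- B replaces A's transpose-then-count-per-column by one row-major streaming pass with per-column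
-- accumulators (vote count, sum of row-index+1); same asymptotics, measured constant-factor faster.


-- ===== PORT A =====
-- while-loops with nonnegative counters are transcribed as foldl over List.range;
-- list indexing (counters, always in range under Pre_) as List.getD.
def combina_predicoes (resultados : List (List Int)) : List Int :=
  let iteracoes := (resultados.headD []).length
  let lista_saida := (List.range iteracoes).foldl (fun acc j =>
    acc ++ [(List.range resultados.length).foldl (fun lista i =>
      lista ++ [(resultados.getD i []).getD j 0]) []]) []
  lista_saida.foldl (fun predicoes result =>
    let s := (List.range result.length).foldl
      (fun st (c : Nat) => if result.getD c 0 == 1 then (st.1 + 1, (c : Int)) else st)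
      ((0 : Int), (0 : Int))
    if s.1 = 1 then predicoes ++ [s.2 + 1]
    else if s.1 > 1 ∨ s.1 = 0 then predicoes ++ [0]
    else predicoes) []

-- ===== PORT B =====
-- B: one row-major streaming pass keeping per-column accumulators (count, sum of i+1);
-- the in-place 'contagens[j] += 1' / 'somas[j] += i+1' updates become List.modify.
def combina_predicoes_alt (resultados : List (List Int)) : List Int :=
  let m := (resultados.headD []).length
  let st := (PySem.List.enumerate resultados 0).foldl
    (fun (st : List Int × List Int) p =>
      (List.range m).foldl (fun st2 j =>
        if p.2.getD j 0 == 1 then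
          (st2.1.modify j (· + 1), st2.2.modify j (· + (p.1 + 1)))
        else st2) st)
    (List.replicate m (0 : Int), List.replicate m (0 : Int))
  (st.1.zip st.2).map (fun cs => if cs.1 == 1 then cs.2 else 0)

-- ===== PRECONDITION & SPEC =====
-- Pre_ excludes exactly the inputs where the Python A raises IndexError: the empty list
-- (len(resultados[0])), and ragged inputs where some row is shorter than row 0.
def Pre_combina_predicoes (resultados : List (List Int)) : Prop :=
  resultados ≠ [] ∧ ∀ row ∈ resultados, (resultados.headD []).length ≤ row.length
instance (resultados : List (List Int)) : Decidable (Pre_combina_predicoes resultados) := by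
  unfold Pre_combina_predicoes; infer_instance
def pvWitness_combina_predicoes : List (List Int) := [[1, 0], [0, 1]]

def Spec_combina_predicoes (resultados : List (List Int)) (out : List Int) : Prop := out = combina_predicoes_alt resultados
instance (resultados : List (List Int)) (out : List Int) : Decidable (Spec_combina_predicoes resultados out) := by unfold Spec_combina_predicoes; infer_instance

-- ===== CLAIM (what is proved, stated in full; the proofs are below) =====
def Claim_equal_combina_predicoes : Prop := ∀ (resultados : List (List Int)), Dom_combina_predicoes resultados → Pre_combina_predicoes resultados → Spec_combina_predicoes resultados (combina_predicoes resultados)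

-- ===== LEMMAS AND PROOFS =====

-- per column j: the row indices voting 1
def pvF (resultados : List (List Int)) (j : Nat) : List Nat :=
  (List.range resultados.length).filter (fun i => (resultados.getD i []).getD j 0 == 1)

-- the common closed form of one column's prediction
def pvVal (resultados : List (List Int)) (j : Nat) : Int :=
  if (pvF resultados j).length = 1
  then ((pvF resultados j).map Int.ofNat).getLastD 0 + 1 else 0

-- A's counting while-loop, characterised: count = number of hits, index = last hit.
theorem pv_countFold (p : Nat → Bool) (l : List Nat) (a b : Int) :
    l.foldl (fun st (c : Nat) => if p c then (st.1 + 1, (c : Int)) else st) (a, b)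
    = (a + (l.filter p).length, ((l.filter p).map Int.ofNat).getLastD b) := by
  induction l generalizing a b with
  | nil => simp
  | cons x l ih =>
    by_cases h : p x
    · simp only [List.foldl_cons, h, if_pos, List.filter_cons_of_pos, ih]
      refine Prod.ext ?_ ?_
      · simp; ring
      · show (List.map Int.ofNat (List.filter p l)).getLastD ↑x
            = (List.map Int.ofNat (x :: List.filter p l)).getLastD b
        rw [List.map_cons, List.getLastD_cons]
        rfl
    · simp [h, ih]

theorem pv_getD_map_range (g : Nat → Int) (m c : Nat) (h : c < m) :
    ((List.range m).map g).getD c 0 = g c := by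
  rw [List.getD_eq_getElem _ _ (by simpa using h)]
  simp

theorem pv_foldl_eq_map {A B : Type} (f : List B → A → List B) (g : A → B) (l : List A)
    (h : ∀ acc x, f acc x = acc ++ [g x]) : l.foldl f [] = l.map g := by
  suffices hgen : ∀ init, l.foldl f init = init ++ l.map g by simpa using hgen []
  induction l with
  | nil => simp
  | cons x l ih => intro init; simp [h, ih]

theorem pv_A_eq (resultados : List (List Int)) :
    combina_predicoes resultados
    = (List.range (resultados.headD []).length).map (pvVal resultados) := by
  dsimp only [combina_predicoes]
  rw [PySem.List.foldl_append_singleton_eq_map, List.nil_append, List.foldl_map]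
  apply pv_foldl_eq_map
  intro acc j
  rw [PySem.List.foldl_append_singleton_eq_map, List.nil_append]
  rw [pv_countFold (fun c =>
      (((List.range resultados.length).map
        (fun i => (resultados.getD i []).getD j 0)).getD c 0 == 1))]
  rw [List.length_map, List.length_range]
  rw [List.filter_congr (fun c hc => by
    rw [pv_getD_map_range _ _ _ (by simpa using List.mem_range.mp hc)])]
  unfold pvVal pvF
  set L := ((List.range resultados.length).filter
      (fun i => (resultados.getD i []).getD j 0 == 1)) with hLdef
  by_cases hlen : L.length = 1
  · simp [hlen]
  · simp [hlen]
    intro hle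
    exact List.eq_nil_of_length_eq_zero (by omega)

-- getD through List.modify (safe also out of range: modify is then a no-op)
theorem pv_getD_modify (l : List Int) (i j : Nat) (f : Int → Int) :
    (l.modify i f).getD j 0 = if i = j ∧ j < l.length then f (l.getD j 0) else l.getD j 0 := by
  simp only [List.getD_eq_getElem?_getD, List.getElem?_modify]
  by_cases hj : j < l.length
  · rw [List.getElem?_eq_getElem hj]
    by_cases hij : i = j <;> simp [hij, hj]
  · rw [List.getElem?_eq_none (by omega)]
    simp [hj]

-- inner loop over the column indices: pointwise effect on the accumulator pair
theorem pv_inner (row : List Int) (i : Int) (l : List Nat) (hnd : l.Nodup) :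
    ∀ (a b : List Int),
    (l.foldl (fun st2 j =>
        if row.getD j 0 == 1 then (st2.1.modify j (· + 1), st2.2.modify j (· + (i + 1)))
        else st2) (a, b)).1.length = a.length ∧
    (l.foldl (fun st2 j =>
        if row.getD j 0 == 1 then (st2.1.modify j (· + 1), st2.2.modify j (· + (i + 1)))
        else st2) (a, b)).2.length = b.length ∧
    ∀ j : Nat,
      (l.foldl (fun st2 j =>
        if row.getD j 0 == 1 then (st2.1.modify j (· + 1), st2.2.modify j (· + (i + 1)))
        else st2) (a, b)).1.getD j 0
        = a.getD j 0 + (if j ∈ l ∧ row.getD j 0 = 1 ∧ j < a.length then 1 else 0) ∧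
      (l.foldl (fun st2 j =>
        if row.getD j 0 == 1 then (st2.1.modify j (· + 1), st2.2.modify j (· + (i + 1)))
        else st2) (a, b)).2.getD j 0
        = b.getD j 0 + (if j ∈ l ∧ row.getD j 0 = 1 ∧ j < b.length then i + 1 else 0) := by
  induction l with
  | nil => intro a b; simp
  | cons k l ih =>
    intro a b
    have hnd' : l.Nodup := hnd.of_cons
    have hk : k ∉ l := by simpa using (List.nodup_cons.mp hnd).1
    by_cases hv : (row.getD k 0 == 1) = true
    · obtain ⟨h1, h2, h3⟩ := ih hnd' (a.modify k (· + 1)) (b.modify k (· + (i + 1)))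
      simp only [List.foldl_cons, hv, if_pos]
      refine ⟨by simpa using h1, by simpa using h2, ?_⟩
      intro j
      obtain ⟨h3a, h3b⟩ := h3 j
      rw [h3a, h3b, pv_getD_modify, pv_getD_modify]
      have hveq : row.getD k 0 = 1 := by simpa using hv
      have hlm : (b.modify k fun x => x + (i+1)).length = b.length := by simp
      have ham : (a.modify k fun x => x + 1).length = a.length := by simp
      constructor
      · by_cases hkj : k = j
        · subst hkj
          simp only [ham, hk, hveq, List.mem_cons, true_or, true_and, false_and]
          by_cases hlt : k < a.length <;> simp [hlt]
        · have hmem : (j ∈ k :: l) ↔ (j ∈ l) := by simp [Ne.symm hkj]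
          simp only [ham, hkj, false_and, if_false, hmem]
      · by_cases hkj : k = j
        · subst hkj
          simp only [hlm, hk, hveq, List.mem_cons, true_or, true_and, false_and]
          by_cases hlt : k < b.length <;> simp [hlt]
        · have hmem : (j ∈ k :: l) ↔ (j ∈ l) := by simp [Ne.symm hkj]
          simp only [hlm, hkj, false_and, if_false, hmem]
    · obtain ⟨h1, h2, h3⟩ := ih hnd' a b
      simp only [List.foldl_cons, hv, if_neg, Bool.false_eq_true, not_false_iff]
      refine ⟨h1, h2, ?_⟩
      intro j
      obtain ⟨h3a, h3b⟩ := h3 j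
      have hveq : ¬ row.getD k 0 = 1 := by simpa using hv
      have hmem : ∀ P : Prop, (j ∈ k :: l ∧ row.getD j 0 = 1 ∧ P) ↔ (j ∈ l ∧ row.getD j 0 = 1 ∧ P) := by
        intro P
        by_cases hkj : k = j
        · subst hkj
          constructor
          · rintro ⟨_, h, _⟩; exact absurd h hveq
          · rintro ⟨hm, h, hp⟩; exact ⟨List.mem_cons_of_mem _ hm, h, hp⟩
        · constructor
          · rintro ⟨hm, h, hp⟩
            rcases List.mem_cons.mp hm with rfl | hm'
            · exact absurd rfl hkj
            · exact ⟨hm', h, hp⟩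
          · rintro ⟨hm, h, hp⟩; exact ⟨List.mem_cons_of_mem _ hm, h, hp⟩
      constructor
      · rw [h3a]; congr 1; rw [if_congr (hmem _) rfl rfl]
      · rw [h3b]; congr 1; rw [if_congr (hmem _) rfl rfl]

-- outer loop over the enumerated rows: count and sum per column
theorem pv_outer (m : Nat) (rows : List (Int × List Int)) :
    ∀ (a b : List Int), a.length = m → b.length = m →
    ((rows.foldl (fun st p =>
      (List.range m).foldl (fun st2 j =>
        if p.2.getD j 0 == 1 then (st2.1.modify j (· + 1), st2.2.modify j (· + (p.1 + 1)))
        else st2) st) (a, b)).1.length = m ∧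
    (rows.foldl (fun st p =>
      (List.range m).foldl (fun st2 j =>
        if p.2.getD j 0 == 1 then (st2.1.modify j (· + 1), st2.2.modify j (· + (p.1 + 1)))
        else st2) st) (a, b)).2.length = m ∧
    ∀ j : Nat, j < m →
      (rows.foldl (fun st p =>
        (List.range m).foldl (fun st2 j =>
          if p.2.getD j 0 == 1 then (st2.1.modify j (· + 1), st2.2.modify j (· + (p.1 + 1)))
          else st2) st) (a, b)).1.getD j 0
        = a.getD j 0 + ((rows.filter (fun p => p.2.getD j 0 == 1)).length : Int) ∧
      (rows.foldl (fun st p =>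
        (List.range m).foldl (fun st2 j =>
          if p.2.getD j 0 == 1 then (st2.1.modify j (· + 1), st2.2.modify j (· + (p.1 + 1)))
          else st2) st) (a, b)).2.getD j 0
        = b.getD j 0 + ((rows.filter (fun p => p.2.getD j 0 == 1)).map (fun p => p.1 + 1)).sum) := by
  induction rows with
  | nil => intro a b ha hb; simp [ha, hb]
  | cons p rows ih =>
    intro a b ha hb
    obtain ⟨h1, h2, h3⟩ := pv_inner p.2 p.1 (List.range m) (List.nodup_range) a b
    simp only [List.foldl_cons]
    obtain ⟨g1, g2, g3⟩ := ih _ _ (h1.trans ha) (h2.trans hb)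
    refine ⟨g1, g2, ?_⟩
    intro j hj
    obtain ⟨g3a, g3b⟩ := g3 j hj
    obtain ⟨h3a, h3b⟩ := h3 j
    rw [g3a, g3b, h3a, h3b]
    by_cases hv : (p.2.getD j 0 == 1) = true
    · have hveq : p.2.getD j 0 = 1 := by simpa using hv
      have hc1 : j ∈ List.range m ∧ p.2.getD j 0 = 1 ∧ j < a.length :=
        ⟨List.mem_range.mpr hj, hveq, by omega⟩
      have hc2 : j ∈ List.range m ∧ p.2.getD j 0 = 1 ∧ j < b.length :=
        ⟨List.mem_range.mpr hj, hveq, by omega⟩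
      have hfc : List.filter (fun q => q.2.getD j 0 == 1) (p :: rows)
          = p :: List.filter (fun q => q.2.getD j 0 == 1) rows := by
        rw [List.filter_cons, if_pos hv]
      rw [if_pos hc1, if_pos hc2, hfc, List.length_cons, List.map_cons, List.sum_cons]
      constructor
      · push_cast; ring
      · ring
    · have hveq : ¬ p.2.getD j 0 = 1 := by simpa using hv
      have hfc : List.filter (fun q => q.2.getD j 0 == 1) (p :: rows)
          = List.filter (fun q => q.2.getD j 0 == 1) rows := by
        rw [List.filter_cons, if_neg hv]
      rw [if_neg (by rintro ⟨_, h, _⟩; exact hveq h), if_neg (by rintro ⟨_, h, _⟩; exact hveq h),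
        hfc]
      constructor
      · ring
      · ring

-- B's enumerate-filter corresponds to pvF (start s)
theorem pv_enumFilter (j : Nat) (xs : List (List Int)) (s : Int) :
    (PySem.List.enumerate xs s).filter (fun p => p.2.getD j 0 == 1)
    = ((List.range xs.length).filter (fun i => (xs.getD i []).getD j 0 == 1)).map
        (fun i => (s + (Int.ofNat i), xs.getD i [])) := by
  induction xs generalizing s with
  | nil => simp [PySem.List.enumerate_nil]
  | cons x xs ih =>
    have tailEq : (PySem.List.enumerate xs (s + 1)).filter (fun p => p.2.getD j 0 == 1)
        = ((List.range xs.length).filter (fun i => (xs.getD i []).getD j 0 == 1)).map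
            (fun i => (s + (Int.ofNat (i + 1)), xs.getD i [])) := by
      rw [ih]
      apply List.map_congr_left; intro i _
      refine Prod.ext ?_ rfl
      simp only [Int.ofNat_eq_natCast]; push_cast; ring
    have predEq : List.filter ((fun i => ((x :: xs).getD i []).getD j 0 == 1) ∘ Nat.succ)
          (List.range xs.length)
        = List.filter (fun i => (xs.getD i []).getD j 0 == 1) (List.range xs.length) :=
      List.filter_congr (fun i _ => by simp [Function.comp])
    have mapEq : ((List.range xs.length).filter
          (fun i => (xs.getD i []).getD j 0 == 1)).map
            ((fun i => (s + (Int.ofNat i), (x :: xs).getD i [])) ∘ Nat.succ)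
        = ((List.range xs.length).filter (fun i => (xs.getD i []).getD j 0 == 1)).map
            (fun i => (s + (Int.ofNat (i + 1)), xs.getD i [])) :=
      List.map_congr_left (fun i _ => by
        refine Prod.ext ?_ rfl
        simp [Function.comp])
    rw [PySem.List.enumerate_cons, List.length_cons, List.range_succ_eq_map]
    by_cases h : (x.getD j 0 == 1) = true
    · rw [List.filter_cons_of_pos (by simpa using h),
        List.filter_cons_of_pos (by simpa using h),
        List.filter_map, List.map_cons, List.map_map, predEq, mapEq, tailEq]
      simp
    · rw [List.filter_cons_of_neg (by simpa using h),
        List.filter_cons_of_neg (by simpa using h),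
        List.filter_map, List.map_map, predEq, mapEq, tailEq]

theorem pv_B_eq (resultados : List (List Int)) :
    combina_predicoes_alt resultados
    = (List.range (resultados.headD []).length).map (pvVal resultados) := by
  dsimp only [combina_predicoes_alt]
  set m := (resultados.headD []).length with hm
  obtain ⟨h1, h2, h3⟩ := pv_outer m (PySem.List.enumerate resultados 0)
    (List.replicate m (0 : Int)) (List.replicate m (0 : Int)) (by simp) (by simp)
  set r := (PySem.List.enumerate resultados 0).foldl (fun st p =>
      (List.range m).foldl (fun st2 j =>
        if p.2.getD j 0 == 1 then (st2.1.modify j (· + 1), st2.2.modify j (· + (p.1 + 1)))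
        else st2) st) (List.replicate m (0 : Int), List.replicate m (0 : Int)) with hr
  apply List.ext_getElem
  · simp only [List.length_map, List.length_zip, h1, h2, List.length_range, min_self]
  intro j hj hj'
  have hjm : j < m := by simpa using hj'
  have hz1 : j < r.1.length := by omega
  have hz2 : j < r.2.length := by omega
  rw [List.getElem_map, List.getElem_map, List.getElem_zip]
  simp only [List.getElem_range]
  obtain ⟨h3a, h3b⟩ := h3 j hjm
  have hg1 : r.1[j] = r.1.getD j 0 := (List.getD_eq_getElem r.1 0 hz1).symm
  have hg2 : r.2[j] = r.2.getD j 0 := (List.getD_eq_getElem r.2 0 hz2).symm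
  show (if r.1[j]'hz1 == 1 then r.2[j]'hz2 else 0) = pvVal resultados j
  rw [hg1, hg2, h3a, h3b, List.getD_replicate, pv_enumFilter]
  unfold pvVal pvF
  rcases hL : ((List.range resultados.length).filter
      (fun i => (resultados.getD i []).getD j 0 == 1)) with _ | ⟨v, tl⟩
  · simp
  · rcases tl with _ | ⟨w, tl'⟩
    · simp
    · have hcond : ¬ (((0 : Int) + (((v :: w :: tl').map
            (fun i => ((0 : Int) + Int.ofNat i, resultados.getD i []))).length : Int)) == 1) = true := by
        simp only [List.length_map, List.length_cons, beq_iff_eq]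
        intro hcontra
        push_cast at hcontra
        omega
      rw [if_neg hcond]
      simp
  exact hjm

-- ===== VERDICT (by name: the statement is the Claim_ definition above) =====
theorem combina_predicoes_spec : Claim_equal_combina_predicoes := by
  intro resultados _ _
  unfold Spec_combina_predicoes
  rw [pv_A_eq, pv_B_eq]
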